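-- pv_equiv track=rewrite | github.com/pontsoleil/Japan_core | data/BIE/checkBIE.py | is_valid_sublist
-- ===== SOURCE A (Python) =====
-- def is_valid_sublist(original, sublist):
--     """
--     Check if the sublist is a valid partial selection from the original list
--     while maintaining the order.
--     """
--     # 現在の位置を追跡するための変数
--     current_index = 0
--     # 部分リストの各要素に対して
--     for item in sublist:
--         # 要素が元のリストに存在する場合、その位置を取得
--         if 'JP'==item[:2]:
--             continue
--         try:
--             index = original.index(item, current_index)
--             current_index = index + 1
--         except ValueError:
--             # 要素が元のリストに存在しない場合、部分リストは無効
--             return False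
--     # すべての要素が正しい順序で存在する場合、部分リストは有効
--     return True
-- ===== SOURCE B (Python) =====
-- def is_valid_sublist(original, sublist):
--     """
--     Check if the sublist is a valid partial selection from the original list
--     while maintaining the order.
--     """
--     # Pass 1: index every value of original by its (ascending) list of positions.
--     pos = {}
--     for i, x in enumerate(original):
--         pos.setdefault(x, []).append(i)
--     # Pass 2: for each non-JP item, binary-search its position list for the
--     # first occurrence at or after cur (bisect_left by hand; no imports).
--     cur = 0
--     for item in sublist:
--         if item[:2] == 'JP':
--             continue
--         ps = pos.get(item, [])
--         lo, hi = 0, len(ps)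
--         while lo < hi:
--             mid = (lo + hi) // 2
--             if ps[mid] < cur:
--                 lo = mid + 1
--             else:
--                 hi = mid
--         if lo == len(ps):
--             return False
--         cur = ps[lo] + 1
--     return True
-- ===== Notes on version B (the rewrite author's own statement) =====
-- stated objective: alternative
-- what changed: Replaces A's repeated original.index/try-except forward scans by a two-phase algorithm: one pass builds a dict mapping each value to its ascending list of positions, then each non-JP item is matched by a hand-written bisect_left binary search on its position list, so no scan of original happens during the sublist loop.
import Mathlib
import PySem

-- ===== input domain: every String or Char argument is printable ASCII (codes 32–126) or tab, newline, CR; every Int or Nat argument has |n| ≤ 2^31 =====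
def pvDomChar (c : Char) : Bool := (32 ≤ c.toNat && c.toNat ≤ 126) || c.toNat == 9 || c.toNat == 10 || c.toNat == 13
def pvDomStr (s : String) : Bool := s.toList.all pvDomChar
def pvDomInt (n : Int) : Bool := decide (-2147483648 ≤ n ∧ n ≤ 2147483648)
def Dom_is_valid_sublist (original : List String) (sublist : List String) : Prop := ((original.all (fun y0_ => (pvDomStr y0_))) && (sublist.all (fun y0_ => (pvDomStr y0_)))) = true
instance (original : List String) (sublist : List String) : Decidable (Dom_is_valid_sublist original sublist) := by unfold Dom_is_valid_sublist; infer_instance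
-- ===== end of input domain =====

-- B replaces A's repeated original.index/try-except scans by a precomputed occurrence-position
-- index (dict mapping each value to its ascending position list) queried with a hand-written
-- bisect_left; return value only, neither version has side effects.

-- ===== PORT A =====
-- original.index(item, cur): linear scan from position cur; none = ValueError
def pyIndexFrom (l : List String) (item : String) (i : Nat) : Option Nat :=
  if h : i < l.length then
    if l[i] = item then some i else pyIndexFrom l item (i + 1)
  else none
termination_by l.length - i

def isvsGoA (original : List String) (cur : Nat) : List String → Bool
  | [] => true
  | item :: rest =>
    if PySem.Str.slice item none (some 2) = "JP" then isvsGoA original cur rest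
    else
      match pyIndexFrom original item cur with
      | some idx => isvsGoA original (idx + 1) rest
      | none => false

def is_valid_sublist (original : List String) (sublist : List String) : Bool :=
  isvsGoA original 0 sublist

-- ===== PORT B =====
-- pass 1: pos.setdefault(x, []).append(i) over enumerate(original)
def isvsBuildPos (original : List String) : PySem.Dict String (List Int) :=
  (PySem.List.enumerate original 0).foldl
    (fun d p => d.modify p.2 [] (fun ps => ps ++ [p.1])) PySem.Dict.empty

-- the while-loop: bisect_left(ps, cur) written by hand; ps[mid] as getD (mid < hi ≤ len(ps) always)
def isvsBisect (ps : List Int) (cur : Int) (lo hi : Nat) : Nat :=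
  if _h : lo < hi then
    let mid := (lo + hi) / 2
    if ps.getD mid 0 < cur then isvsBisect ps cur (mid + 1) hi
    else isvsBisect ps cur lo mid
  else lo
termination_by hi - lo

def isvsGoB (pos : PySem.Dict String (List Int)) (cur : Int) : List String → Bool
  | [] => true
  | item :: rest =>
    if PySem.Str.slice item none (some 2) = "JP" then isvsGoB pos cur rest
    else
      let ps := pos.getD item []
      let lo := isvsBisect ps cur 0 ps.length
      if lo = ps.length then false
      else isvsGoB pos (ps.getD lo 0 + 1) rest

def is_valid_sublist_alt (original : List String) (sublist : List String) : Bool :=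
  isvsGoB (isvsBuildPos original) 0 sublist

-- ===== PRECONDITION & SPEC =====
def Spec_is_valid_sublist (original : List String) (sublist : List String) (out : Bool) : Prop := out = is_valid_sublist_alt original sublist
instance (original : List String) (sublist : List String) (out : Bool) : Decidable (Spec_is_valid_sublist original sublist out) := by unfold Spec_is_valid_sublist; infer_instance

-- ===== CLAIM (what is proved, stated in full; the proofs are below) =====
def Claim_equal_is_valid_sublist : Prop := ∀ (original : List String) (sublist : List String), Dom_is_valid_sublist original sublist → Spec_is_valid_sublist original sublist (is_valid_sublist original sublist)

-- ===== LEMMAS AND PROOFS =====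

-- the position list B's index stores under a given key
def isvsPs (original : List String) (item : String) : List Int :=
  ((PySem.List.enumerate original 0).filter (fun p => p.2 == item)).map (·.1)

theorem isvs_mem_enumerate {α : Type} (l : List α) (s : Int) (p : Int × α) :
    p ∈ PySem.List.enumerate l s ↔ ∃ k, ∃ h : k < l.length, p = ((s + k : Int), l[k]) := by
  induction l generalizing s with
  | nil => simp [PySem.List.enumerate_nil]
  | cons x xs ih =>
    rw [PySem.List.enumerate_cons]
    simp only [List.mem_cons, ih (s+1)]
    constructor
    · rintro (rfl | ⟨k, hk, rfl⟩)
      · exact ⟨0, by simp, by simp⟩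
      · refine ⟨k+1, by simpa using hk, ?_⟩
        simp; ring
    · rintro ⟨k, hk, rfl⟩
      cases k with
      | zero => left; simp
      | succ k =>
        right; refine ⟨k, by simpa using hk, ?_⟩
        simp; ring
theorem ps_sorted (original : List String) (item : String) :
    (isvsPs original item).Pairwise (· < ·) := by
  have h1 : ((PySem.List.enumerate original 0).map (·.1)).Pairwise (· < ·) := by
    rw [PySem.List.map_fst_enumerate]
    exact PySem.List.pairwise_lt_pyRange_one 0 _
  rw [List.pairwise_map] at h1
  exact List.pairwise_map.mpr (h1.sublist List.filter_sublist)

theorem mem_ps (original : List String) (item : String) (j : Int) :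
    j ∈ isvsPs original item ↔ ∃ k, ∃ h : k < original.length, j = (k : Int) ∧ original[k] = item := by
  unfold isvsPs
  simp only [List.mem_map, List.mem_filter, isvs_mem_enumerate]
  constructor
  · rintro ⟨p, ⟨⟨k, hk, rfl⟩, hx⟩, rfl⟩
    refine ⟨k, hk, by simp, by simpa using hx⟩
  · rintro ⟨k, hk, rfl, hx⟩
    exact ⟨((k : Int), original[k]), ⟨⟨k, hk, by simp⟩, by simpa using hx⟩, rfl⟩

theorem pyIndexFrom_eq_some (l : List String) (x : String) (c j : Nat) :
    pyIndexFrom l x c = some j ↔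
      c ≤ j ∧ ∃ h : j < l.length, l[j] = x ∧ ∀ i, c ≤ i → i < j → ∀ h' : i < l.length, l[i] ≠ x := by
  rw [pyIndexFrom]
  by_cases h : c < l.length
  · rw [dif_pos h]
    by_cases he : l[c] = x
    · rw [if_pos he]
      simp only [Option.some.injEq]
      constructor
      · rintro rfl; exact ⟨le_refl _, h, he, by omega⟩
      · rintro ⟨hcj, hj, hx, hmin⟩
        rcases Nat.eq_or_lt_of_le hcj with rfl | hlt
        · rfl
        · exact absurd he (hmin c (le_refl _) hlt h)
    · rw [if_neg he, pyIndexFrom_eq_some l x (c+1) j]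
      constructor
      · rintro ⟨hcj, hj, hx, hmin⟩
        refine ⟨by omega, hj, hx, fun i hi hij hi' => ?_⟩
        rcases Nat.eq_or_lt_of_le hi with rfl | hlt
        · exact he
        · exact hmin i (by omega) hij hi'
      · rintro ⟨hcj, hj, hx, hmin⟩
        have : c ≠ j := by rintro rfl; exact he hx
        exact ⟨by omega, hj, hx, fun i hi hij hi' => hmin i (by omega) hij hi'⟩
  · rw [dif_neg h]
    constructor
    · rintro ⟨⟩
    · rintro ⟨_, hj, _⟩; omega
termination_by l.length - c

theorem pyIndexFrom_eq_none (l : List String) (x : String) (c : Nat) :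
    pyIndexFrom l x c = none ↔ ∀ i, c ≤ i → ∀ h : i < l.length, l[i] ≠ x := by
  rw [pyIndexFrom]
  by_cases h : c < l.length
  · rw [dif_pos h]
    by_cases he : l[c] = x
    · rw [if_pos he]
      constructor
      · rintro ⟨⟩
      · intro hall; exact absurd he (hall c (le_refl _) h)
    · rw [if_neg he, pyIndexFrom_eq_none l x (c+1)]
      constructor
      · intro hall i hi hi'
        rcases Nat.eq_or_lt_of_le hi with rfl | hlt
        · exact he
        · exact hall i (by omega) hi'
      · intro hall i hi hi'; exact hall i (by omega) hi'
  · rw [dif_neg h]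
    simp only [true_iff]
    intro i _ hi'; omega
termination_by l.length - c

theorem ps_mono (ps : List Int) (hmono : ps.Pairwise (· < ·)) (i j : Nat)
    (hij : i ≤ j) (hj : j < ps.length) : ps.getD i 0 ≤ ps.getD j 0 := by
  rcases Nat.eq_or_lt_of_le hij with rfl | hlt
  · exact le_refl _
  · have := List.pairwise_iff_getElem.mp hmono i j (by omega) hj hlt
    rw [List.getD_eq_getElem ps 0 (by omega), List.getD_eq_getElem ps 0 hj]
    omega

theorem isvsBisect_inv (ps : List Int) (cur : Int)
    (hmono : ps.Pairwise (· < ·)) :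
    ∀ lo hi, lo ≤ hi → hi ≤ ps.length →
      (∀ i, i < lo → ps.getD i 0 < cur) →
      (∀ i, hi ≤ i → i < ps.length → ¬ ps.getD i 0 < cur) →
      (isvsBisect ps cur lo hi ≤ ps.length ∧
       (∀ i, i < isvsBisect ps cur lo hi → ps.getD i 0 < cur) ∧
       (∀ i, isvsBisect ps cur lo hi ≤ i → i < ps.length → ¬ ps.getD i 0 < cur)) := by
  intro lo hi
  induction hlh : hi - lo using Nat.strong_induction_on generalizing lo hi with
  | _ n ih =>
  intro hle hhi hlow hhigh
  rw [isvsBisect]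
  by_cases h : lo < hi
  · rw [dif_pos h]
    set mid := (lo + hi) / 2 with hmid
    have hm1 : lo ≤ mid := by omega
    have hm2 : mid < hi := by omega
    by_cases hc : ps.getD mid 0 < cur
    · rw [if_pos hc]
      refine ih (hi - (mid + 1)) (by omega) (mid+1) hi rfl (by omega) hhi ?_ hhigh
      intro i hi'
      exact lt_of_le_of_lt (ps_mono ps hmono i mid (by omega) (by omega)) hc
    · rw [if_neg hc]
      refine ih (mid - lo) (by omega) lo mid rfl (by omega) (by omega) hlow ?_
      intro i hmi hil hlt
      exact hc (lt_of_le_of_lt (ps_mono ps hmono mid i hmi hil) hlt)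
  · rw [dif_neg h]
    have : lo = hi := by omega
    subst this
    exact ⟨hhi, hlow, hhigh⟩

theorem mem_iff_getD (ps : List Int) (a : Int) :
    a ∈ ps ↔ ∃ k, k < ps.length ∧ ps.getD k 0 = a := by
  rw [List.mem_iff_getElem]
  constructor
  · rintro ⟨k, hk, rfl⟩; exact ⟨k, hk, List.getD_eq_getElem ps 0 hk⟩
  · rintro ⟨k, hk, hg⟩; exact ⟨k, hk, by rw [← List.getD_eq_getElem ps 0 hk, hg]⟩

theorem buildPos_getD (original : List String) (item : String) :
    (isvsBuildPos original).getD item [] = isvsPs original item := by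
  unfold isvsBuildPos isvsPs
  have h : ((PySem.List.enumerate original 0).map Prod.swap).foldl
      (fun (d : PySem.Dict String (List Int)) q => d.modify q.1 [] (fun ps => ps ++ [q.2])) PySem.Dict.empty
      = (PySem.List.enumerate original 0).foldl (fun d p => d.modify p.2 [] (fun ps => ps ++ [p.1])) PySem.Dict.empty :=
    List.foldl_map
  rw [← h, PySem.Dict.getD_foldl_modify_append]
  simp [List.filter_map, Function.comp_def]

theorem goA_eq_goB (original : List String) (sublist : List String) (c : Nat) :
    isvsGoA original c sublist = isvsGoB (isvsBuildPos original) (c : Int) sublist := by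
  induction sublist generalizing c with
  | nil => rfl
  | cons item rest ih =>
    simp only [isvsGoA, isvsGoB]
    split
    · exact ih c
    · rw [buildPos_getD]
      set ps := isvsPs original item with hps
      set r := isvsBisect ps (c : Int) 0 ps.length with hr
      obtain ⟨hrlen, hlow, hhigh⟩ :=
        isvsBisect_inv ps (c : Int) (ps_sorted original item) 0 ps.length
          (Nat.zero_le _) (le_refl _) (by omega) (fun i h1 h2 => absurd h1 (by omega))
      by_cases hre : r = ps.length
      · rw [if_pos hre]
        have hnone : pyIndexFrom original item c = none := by
          rw [pyIndexFrom_eq_none]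
          intro i hci hi' hx
          have : (i : Int) ∈ ps := (mem_ps original item _).mpr ⟨i, hi', rfl, hx⟩
          obtain ⟨k, hk, hg⟩ := (mem_iff_getD ps _).mp this
          have := hlow k (by omega)
          rw [hg] at this
          omega
        rw [hnone]
      · rw [if_neg hre]
        have hrlt : r < ps.length := by omega
        have hmem : ps.getD r 0 ∈ ps := (mem_iff_getD ps _).mpr ⟨r, hrlt, rfl⟩
        obtain ⟨j0, hj0, hjeq, hjx⟩ := (mem_ps original item _).mp hmem
        have hcj : c ≤ j0 := by
          have := hhigh r (le_refl _) hrlt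
          rw [hjeq] at this; omega
        have hsome : pyIndexFrom original item c = some j0 := by
          rw [pyIndexFrom_eq_some]
          refine ⟨hcj, hj0, hjx, fun i hci hij hi' hx => ?_⟩
          have : (i : Int) ∈ ps := (mem_ps original item _).mpr ⟨i, hi', rfl, hx⟩
          obtain ⟨k, hk, hg⟩ := (mem_iff_getD ps _).mp this
          by_cases hkr : k < r
          · have := hlow k hkr; rw [hg] at this; omega
          · have := ps_mono ps (ps_sorted original item) r k (by omega) hk
            rw [hg, hjeq] at this; omega
        rw [hsome]
        have : ps.getD r 0 + 1 = ((j0 + 1 : Nat) : Int) := by rw [hjeq]; push_cast; ring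
        rw [this]
        exact ih (j0 + 1)


-- ===== VERDICT (by name: the statement is the Claim_ definition above) =====
theorem is_valid_sublist_spec : Claim_equal_is_valid_sublist := by
  intro original sublist _
  unfold Spec_is_valid_sublist is_valid_sublist is_valid_sublist_alt
  exact goA_eq_goB original sublist 0
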